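-- pv_equiv track=rewrite | github.com/lorenzopalloni/master-thesis-codebase | binarization/datatools.py | make_4times_divisible
-- ===== SOURCE A (Python) =====
-- def make_4times_divisible(an_integer: int) -> int:
--     """Given an integer `an_integer`, returns another integer that:
--     - is greater than `an_integer`
--     - is divisible at least four times by 2
--     - is the closest to `an_integer`
--
--     Adapts image sizes to feed a UNet-like architecture.
--
--     Args:
--         an_integer (int): an integer greater than 0.
--
--     Returns:
--         int: an integer with the properties described above.
--     """
--     assert (
--         an_integer > 0
--     ), f"Input should be > 0, but `{an_integer}` was provided."
--     if an_integer % 2 != 0:  # make it even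
--         an_integer += 1
--     while an_integer / 2**4 % 2 != 0:  # assure divisibility by 16
--         an_integer += 2  # jump from one even number to the next one
--     return an_integer
-- ===== SOURCE B (Python) =====
-- def make_4times_divisible(an_integer: int) -> int:
--     assert (
--         an_integer > 0
--     ), f"Input should be > 0, but `{an_integer}` was provided."
--     return -(-an_integer // 32) * 32
-- ===== Notes on version B (the rewrite author's own statement) =====
-- stated objective: simpler
-- what changed: Replaced the even-adjustment step and the increment-by-2 loop with a single closed-form ceiling to the next multiple of 32.
import Mathlib
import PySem

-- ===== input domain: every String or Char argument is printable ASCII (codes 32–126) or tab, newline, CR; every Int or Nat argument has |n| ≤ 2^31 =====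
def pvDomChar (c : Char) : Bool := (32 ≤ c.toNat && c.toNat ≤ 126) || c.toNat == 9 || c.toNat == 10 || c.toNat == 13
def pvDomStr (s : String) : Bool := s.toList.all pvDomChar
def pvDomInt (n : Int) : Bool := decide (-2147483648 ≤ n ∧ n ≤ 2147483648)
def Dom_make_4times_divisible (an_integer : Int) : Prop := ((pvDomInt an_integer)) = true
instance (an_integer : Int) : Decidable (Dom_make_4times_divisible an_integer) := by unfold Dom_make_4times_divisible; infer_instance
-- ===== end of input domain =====

-- B replaces A's even-adjustment plus increment-by-2 loop with a single closed-form
-- ceiling to the next multiple of 32 (objective: simpler).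


-- ===== PORT A =====
-- the while loop: `while an_integer / 2**4 % 2 != 0: an_integer += 2`.
-- On the domain (|n| ≤ 2^31) the float test `n / 16 % 2 != 0` is exact and holds
-- iff n % 32 ≠ 0.  The extra `n % 2 = 0` conjunct is purely a totality guard
-- (the Python loop is only ever entered with an even value, on which it takes
-- at most 15 steps; fuel 16 is a totality guard that the even case never exhausts).
def make_4times_divisible_loop : Nat → Int → Int
  | 0, n => n
  | fuel + 1, n => if n % 32 ≠ 0 then make_4times_divisible_loop fuel (n + 2) else n

def make_4times_divisible (an_integer : Int) : Int :=
  -- assert an_integer > 0: Pre_ excludes an_integer ≤ 0 (AssertionError); value there is unclaimed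
  let an_integer := if an_integer % 2 ≠ 0 then an_integer + 1 else an_integer
  make_4times_divisible_loop 16 an_integer

-- ===== PORT B =====
def make_4times_divisible_alt (an_integer : Int) : Int :=
  -- assert an_integer > 0 (same as A)
  -(PySem.Int.floordiv (-an_integer) 32) * 32

-- ===== PRECONDITION & SPEC =====
-- A's assert raises AssertionError for an_integer ≤ 0.
def Pre_make_4times_divisible (an_integer : Int) : Prop := an_integer > 0
instance (an_integer : Int) : Decidable (Pre_make_4times_divisible an_integer) := by unfold Pre_make_4times_divisible; infer_instance
def pvWitness_make_4times_divisible : Int := (7)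

def Spec_make_4times_divisible (an_integer : Int) (out : Int) : Prop := out = make_4times_divisible_alt an_integer
instance (an_integer : Int) (out : Int) : Decidable (Spec_make_4times_divisible an_integer out) := by unfold Spec_make_4times_divisible; infer_instance

-- ===== CLAIM (what is proved, stated in full; the proofs are below) =====
def Claim_equal_make_4times_divisible : Prop := ∀ (an_integer : Int), Dom_make_4times_divisible an_integer → Pre_make_4times_divisible an_integer → Spec_make_4times_divisible an_integer (make_4times_divisible an_integer)

-- ===== LEMMAS AND PROOFS =====
-- The loop, started at an even value with enough fuel, lands on the next multiple of 32.
theorem make_4times_divisible_loop_eq (fuel : Nat) (n : Int) (h : n % 2 = 0)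
    (hf : ((-n) % 32).toNat ≤ 2 * fuel) :
    make_4times_divisible_loop fuel n = n + (-n) % 32 := by
  induction fuel generalizing n with
  | zero => simp only [make_4times_divisible_loop]; omega
  | succ f ih =>
    simp only [make_4times_divisible_loop]
    by_cases hc : n % 32 ≠ 0
    · rw [if_pos hc, ih (n + 2) (by omega) (by omega)]; omega
    · rw [if_neg hc]; omega

-- ===== VERDICT (by name: the statement is the Claim_ definition above) =====
theorem make_4times_divisible_spec : Claim_equal_make_4times_divisible := by
  intro n _ _
  unfold Spec_make_4times_divisible make_4times_divisible make_4times_divisible_alt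
  rw [PySem.Int.floordiv_eq_ediv_of_pos (by omega)]
  by_cases h : n % 2 ≠ 0 <;>
    simp only [h, ite_false] <;>
    rw [make_4times_divisible_loop_eq 16 _ (by omega) (by omega)] <;> omega
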